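-- pv_equiv track=rewrite | github.com/frantrub/Chiffres | Chiffres 1.py | calculs_possibles
-- ===== SOURCE A (Python) =====
-- def calculs_possibles(cartes_disponibles, nombre_cherché):
--
--     if nombre_cherché in cartes_disponibles:
--         return "Le compte est bon !"
--
--     for i in range(len(cartes_disponibles)):
--         for j in range(i+1, len(cartes_disponibles)):
--             x, y = cartes_disponibles[i], cartes_disponibles[j]
--             x, y = max(x, y), min(x, y)
--
--             nouvelles_cartes = (cartes_disponibles[:i] +
--                                 cartes_disponibles[i+1:j] +
--                                 cartes_disponibles[j+1:])
--
--             liste_des_opérateurs = [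
--                 [x + y, "+"], [x * y, "×"], [x - y, "-"]
--             ]
--             if y != 0 and x % y == 0:
--                 liste_des_opérateurs.append([x // y, "÷"])
--
--             for valeur, opérateur in liste_des_opérateurs:
--                 essai = calculs_possibles(nouvelles_cartes + [valeur],
--                                           nombre_cherché)
--                 if essai is not None:
--                     return (str(x) + " " + opérateur + " " + str(y) +
--                             " = " + str(valeur) + "\n" + essai)
--     return None
-- ===== SOURCE B (Python) =====
-- def calculs_possibles(cartes_disponibles, nombre_cherché):
--     # Structural pair enumeration (no index arithmetic / slicing): candidates for a
--     # state are built once as a flat ordered list, and a failure cache prunes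
--     # re-exploration of card lists whose whole subtree already failed.
--     échecs = set()
--
--     def picks(lst):
--         # ordered (element, rest-without-it) choices, recursively on the structure
--         if not lst:
--             return []
--         head, tail = lst[0], lst[1:]
--         return [(head, tail)] + [(y, [head] + r) for (y, r) in picks(tail)]
--
--     def pairs(lst):
--         # ordered unordered-pair choices (u, v, remaining), same order as index pairs i<j
--         if not lst:
--             return []
--         head, tail = lst[0], lst[1:]
--         return ([(head, v, r) for (v, r) in picks(tail)] +
--                 [(u, v, [head] + r) for (u, v, r) in pairs(tail)])
--
--     def candidates(cartes):
--         out = []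
--         for u, v, reste in pairs(cartes):
--             x, y = (u, v) if u >= v else (v, u)
--             ops = [(x + y, "+"), (x * y, "×"), (x - y, "-")]
--             if y != 0 and x % y == 0:
--                 ops.append((x // y, "÷"))
--             for valeur, op in ops:
--                 out.append((x, op, y, valeur, reste + [valeur]))
--         return out
--
--     def solve(cartes):
--         if nombre_cherché in cartes:
--             return "Le compte est bon !"
--         clé = tuple(cartes)
--         if clé in échecs:
--             return None
--         for x, op, y, valeur, suivant in candidates(cartes):
--             essai = solve(suivant)
--             if essai is not None:
--                 return f"{x} {op} {y} = {valeur}\n{essai}"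
--         échecs.add(clé)
--         return None
--
--     return solve(cartes_disponibles)
-- ===== Notes on version B (the rewrite author's own statement) =====
-- stated objective: alternative
-- what changed: B replaces A's index-and-slice nested pair loops by a structural recursive pair enumeration (picks/pairs) flattened into one candidate list per state, and adds a negative-result memo set so a card list whose whole subtree failed is never re-searched; the DFS visiting order and the returned string are unchanged (exploration remains exponential, so no speed is claimed).
import Mathlib
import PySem

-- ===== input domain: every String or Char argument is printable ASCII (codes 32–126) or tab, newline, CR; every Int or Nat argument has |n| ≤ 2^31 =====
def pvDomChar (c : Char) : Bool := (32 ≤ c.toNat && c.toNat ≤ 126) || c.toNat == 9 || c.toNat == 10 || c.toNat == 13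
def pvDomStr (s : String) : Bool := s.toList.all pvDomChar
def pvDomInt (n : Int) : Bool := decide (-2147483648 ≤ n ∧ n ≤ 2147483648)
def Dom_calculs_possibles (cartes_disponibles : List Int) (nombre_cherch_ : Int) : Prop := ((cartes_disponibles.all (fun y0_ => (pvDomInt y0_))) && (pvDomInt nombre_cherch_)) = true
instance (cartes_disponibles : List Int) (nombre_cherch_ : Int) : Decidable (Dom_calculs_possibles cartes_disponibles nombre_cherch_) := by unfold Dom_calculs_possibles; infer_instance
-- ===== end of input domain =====

-- B replaces A's index/slice pair loops by a structural pair enumeration into one flat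
-- candidate list and adds a failure cache pruning re-exploration of repeated card lists,
-- keeping A's DFS order and returned string (objective: alternative).

-- ===== PORT A =====
def pvOps (x y : Int) : List (Int × String) :=
  [(x + y, "+"), (x * y, "×"), (x - y, "-")] ++
    (if y ≠ 0 ∧ PySem.Int.mod x y = 0 then [(PySem.Int.floordiv x y, "÷")] else [])

def pvReste (c : List Int) (i j : Int) : List Int :=
  PySem.List.slice c none (some i) ++ PySem.List.slice c (some (i + 1)) (some j) ++
    PySem.List.slice c (some (j + 1)) none

def pvLigne (x : Int) (op : String) (y v : Int) (essai : String) : String :=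
  PySem.Int.toStr x ++ " " ++ op ++ " " ++ PySem.Int.toStr y ++ " = " ++
    PySem.Int.toStr v ++ "\n" ++ essai

def pvLoopOpsA (rec : List Int → Option String) (x y : Int) (reste : List Int) :
    List (Int × String) → Option String
  | [] => none
  | (v, op) :: rest =>
    match rec (reste ++ [v]) with
    | some essai => some (pvLigne x op y v essai)
    | none => pvLoopOpsA rec x y reste rest

def pvLoopJA (rec : List Int → Option String) (c : List Int) (i : Int) :
    List Int → Option String
  | [] => none
  | j :: js =>
    let x0 := PySem.List.pyGetD c i 0
    let y0 := PySem.List.pyGetD c j 0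
    match pvLoopOpsA rec (max x0 y0) (min x0 y0) (pvReste c i j) (pvOps (max x0 y0) (min x0 y0)) with
    | some r => some r
    | none => pvLoopJA rec c i js

def pvLoopIA (rec : List Int → Option String) (c : List Int) :
    List Int → Option String
  | [] => none
  | i :: is' =>
    match pvLoopJA rec c i (PySem.List.pyRange (i + 1) (c.length : Int) 1) with
    | some r => some r
    | none => pvLoopIA rec c is'

-- fuel = number of cards: every recursive call removes two cards and adds one
def pvRunA : Nat → List Int → Int → Option String
  | fuel, c, t =>
    if c.contains t then some "Le compte est bon !"
    else
      match fuel with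
      | 0 => none  -- fuel device only: reachable only for c = [], where both pair loops are empty
      | fuel' + 1 =>
        pvLoopIA (fun c' => pvRunA fuel' c' t) c (PySem.List.pyRange 0 (c.length : Int) 1)

def calculs_possibles (cartes_disponibles : List Int) (nombre_cherch_ : Int) : Option String :=
  pvRunA cartes_disponibles.length cartes_disponibles nombre_cherch_

-- ===== PORT B =====
-- picks: ordered (element, rest-without-it) choices, recursively on the list structure
def pvPicks : List Int → List (Int × List Int)
  | [] => []
  | h :: t => (h, t) :: (pvPicks t).map (fun p => (p.1, h :: p.2))

-- pairs: ordered unordered-pair choices (u, v, remaining)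
def pvPairs : List Int → List (Int × Int × List Int)
  | [] => []
  | h :: t =>
    (pvPicks t).map (fun p => (h, p.1, p.2)) ++
      (pvPairs t).map (fun q => (q.1, q.2.1, h :: q.2.2))

-- candidates: the flat ordered list of (x, op, y, valeur, next-cards)
def pvCands (c : List Int) : List (Int × String × Int × Int × List Int) :=
  (pvPairs c).flatMap (fun q =>
    let x := if q.1 ≥ q.2.1 then q.1 else q.2.1
    let y := if q.1 ≥ q.2.1 then q.2.1 else q.1
    ([(x + y, "+"), (x * y, "×"), (x - y, "-")] ++
        (if y ≠ 0 ∧ PySem.Int.mod x y = 0 then [(PySem.Int.floordiv x y, "÷")] else [])).map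
      (fun p => (x, p.2, y, p.1, q.2.2 ++ [p.1])))

-- the single candidate loop, threading the failure cache
def pvTryB (rec : List Int → PySem.Set (List Int) → Option String × PySem.Set (List Int)) :
    List (Int × String × Int × Int × List Int) → PySem.Set (List Int) →
      Option String × PySem.Set (List Int)
  | [], f => (none, f)
  | (x, op, y, v, suivant) :: rest, f =>
    match rec suivant f with
    | (some essai, f') =>
      (some (PySem.Int.toStr x ++ " " ++ op ++ " " ++ PySem.Int.toStr y ++ " = " ++
        PySem.Int.toStr v ++ "\n" ++ essai), f')
    | (none, f') => pvTryB rec rest f'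

-- solve threads the memo set 'échecs' of card lists whose whole subtree failed
def pvSolveB : Nat → Int → List Int → PySem.Set (List Int) → Option String × PySem.Set (List Int)
  | fuel, t, c, f =>
    if c.contains t then (some "Le compte est bon !", f)
    else if PySem.Set.contains f c then (none, f)
    else
      match fuel with
      | 0 => (none, PySem.Set.add f c)  -- fuel device only: reachable only for c = [] (no candidates, then échecs.add)
      | fuel' + 1 =>
        match pvTryB (fun c' f' => pvSolveB fuel' t c' f') (pvCands c) f with
        | (some r, f') => (some r, f')
        | (none, f') => (none, PySem.Set.add f' c)

def calculs_possibles_alt (cartes_disponibles : List Int) (nombre_cherch_ : Int) : Option String :=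
  (pvSolveB cartes_disponibles.length nombre_cherch_ cartes_disponibles PySem.Set.empty).1

-- ===== PRECONDITION & SPEC =====
def Spec_calculs_possibles (cartes_disponibles : List Int) (nombre_cherch_ : Int) (out : Option String) : Prop := out = calculs_possibles_alt cartes_disponibles nombre_cherch_
instance (cartes_disponibles : List Int) (nombre_cherch_ : Int) (out : Option String) : Decidable (Spec_calculs_possibles cartes_disponibles nombre_cherch_ out) := by unfold Spec_calculs_possibles; infer_instance

-- ===== CLAIM (what is proved, stated in full; the proofs are below) =====
def Claim_equal_calculs_possibles : Prop := ∀ (cartes_disponibles : List Int) (nombre_cherch_ : Int), Dom_calculs_possibles cartes_disponibles nombre_cherch_ → Spec_calculs_possibles cartes_disponibles nombre_cherch_ (calculs_possibles cartes_disponibles nombre_cherch_)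

-- ===== LEMMAS AND PROOFS =====

-- A's per-pair expansion, written on a (u, v, reste) triple
def pvExpand (u v : Int) (r : List Int) : List (Int × String × Int × Int × List Int) :=
  (pvOps (max u v) (min u v)).map (fun p => (max u v, p.2, min u v, p.1, r ++ [p.1]))

-- first-success over a candidate list (pure, A-side)
def pvFirstA (rec : List Int → Option String) :
    List (Int × String × Int × Int × List Int) → Option String
  | [] => none
  | (x, op, y, v, ch) :: rest =>
    match rec ch with
    | some essai => some (pvLigne x op y v essai)
    | none => pvFirstA rec rest

lemma pvFirstA_append (rec : List Int → Option String) (l₁ l₂ : List (Int × String × Int × Int × List Int)) :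
    pvFirstA rec (l₁ ++ l₂) =
      match pvFirstA rec l₁ with
      | some r => some r
      | none => pvFirstA rec l₂ := by
  induction l₁ with
  | nil => simp [pvFirstA]
  | cons c rest ih =>
    obtain ⟨x, op, y, v, ch⟩ := c
    simp only [List.cons_append, pvFirstA]
    cases rec ch <;> simp [ih]

lemma pvLoopOpsA_eq (rec : List Int → Option String) (x y : Int) (reste : List Int) (ops : List (Int × String)) :
    pvLoopOpsA rec x y reste ops =
      pvFirstA rec (ops.map (fun p => (x, p.2, y, p.1, reste ++ [p.1]))) := by
  induction ops with
  | nil => rfl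
  | cons p rest ih =>
    obtain ⟨v, op⟩ := p
    simp only [pvLoopOpsA, List.map_cons, pvFirstA]
    cases rec (reste ++ [v]) <;> simp [ih]

lemma pvLoopJA_eq (rec : List Int → Option String) (c : List Int) (i : Int) (js : List Int) :
    pvLoopJA rec c i js =
      pvFirstA rec (js.flatMap (fun j =>
        pvExpand (PySem.List.pyGetD c i 0) (PySem.List.pyGetD c j 0) (pvReste c i j))) := by
  induction js with
  | nil => rfl
  | cons j js' ih =>
    simp only [pvLoopJA, List.flatMap_cons, pvFirstA_append, pvLoopOpsA_eq, pvExpand]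
    cases pvFirstA rec ((pvOps (max (PySem.List.pyGetD c i 0) (PySem.List.pyGetD c j 0))
        (min (PySem.List.pyGetD c i 0) (PySem.List.pyGetD c j 0))).map _) <;> simp [ih, pvExpand]

lemma pvLoopIA_eq (rec : List Int → Option String) (c : List Int) (is' : List Int) :
    pvLoopIA rec c is' =
      pvFirstA rec (is'.flatMap (fun i =>
        (PySem.List.pyRange (i + 1) (c.length : Int) 1).flatMap (fun j =>
          pvExpand (PySem.List.pyGetD c i 0) (PySem.List.pyGetD c j 0) (pvReste c i j)))) := by
  induction is' with
  | nil => rfl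
  | cons i is'' ih =>
    simp only [pvLoopIA, List.flatMap_cons, pvFirstA_append, pvLoopJA_eq]
    cases pvFirstA rec ((PySem.List.pyRange (i + 1) (c.length : Int) 1).flatMap _) <;> simp [ih]


-- index-shift and cons lemmas for A's index/slice formulation
lemma pvRange_shift (a b : Int) :
    PySem.List.pyRange (a + 1) (b + 1) 1 = (PySem.List.pyRange a b 1).map (· + 1) := by
  rw [PySem.List.pyRange_one, PySem.List.pyRange_one]
  simp only [List.map_map]
  have hb : b + 1 - (a + 1) = b - a := by ring
  rw [hb]
  apply List.map_congr_left
  intro k _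
  simp only [Function.comp_apply]
  ring

lemma pvGetD_zero (h : Int) (t : List Int) : PySem.List.pyGetD (h :: t) 0 0 = h := by
  simp [pysem]

lemma pvGetD_cons (h : Int) (t : List Int) {i : Int} (hi : 0 ≤ i) :
    PySem.List.pyGetD (h :: t) (i + 1) 0 = PySem.List.pyGetD t i 0 := by
  rw [PySem.List.pyGetD_of_nonneg _ _ (by omega), PySem.List.pyGetD_of_nonneg _ _ hi]
  have hn : (i + 1).toNat = i.toNat + 1 := by omega
  simp [hn]

lemma pvReste_zero (h : Int) (t : List Int) {j : Int} (hj : 0 ≤ j) :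
    pvReste (h :: t) 0 (j + 1) = t.take j.toNat ++ t.drop (j.toNat + 1) := by
  unfold pvReste
  rw [PySem.List.slice_to _ (by omega : (0:Int) ≤ 0),
      PySem.List.slice_toNat _ (by omega : (0:Int) ≤ 0 + 1) (by omega),
      PySem.List.slice_from _ (by omega : (0:Int) ≤ j + 1 + 1)]
  have h1 : ((0:Int) + 1).toNat = 1 := by omega
  have h2 : (j + 1).toNat = j.toNat + 1 := by omega
  have h3 : (j + 1 + 1).toNat = j.toNat + 2 := by omega
  simp [h2, h3]

lemma pvReste_cons (h : Int) (t : List Int) {i j : Int} (hi : 0 ≤ i) (hj : 0 ≤ j) :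
    pvReste (h :: t) (i + 1) (j + 1) = h :: pvReste t i j := by
  unfold pvReste
  rw [PySem.List.slice_to _ (by omega : (0:Int) ≤ i + 1), PySem.List.slice_to _ hi,
      PySem.List.slice_toNat _ (by omega : (0:Int) ≤ i + 1 + 1) (by omega : (0:Int) ≤ j + 1),
      PySem.List.slice_toNat _ (by omega : (0:Int) ≤ i + 1) hj,
      PySem.List.slice_from _ (by omega : (0:Int) ≤ j + 1 + 1),
      PySem.List.slice_from _ (by omega : (0:Int) ≤ j + 1)]
  have h1 : (i + 1).toNat = i.toNat + 1 := by omega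
  have h2 : (j + 1).toNat = j.toNat + 1 := by omega
  have h3 : (i + 1 + 1).toNat = i.toNat + 2 := by omega
  have h4 : (j + 1 + 1).toNat = j.toNat + 2 := by omega
  have h5 : j.toNat + 1 - (i.toNat + 2) = j.toNat - (i.toNat + 1) := by omega
  simp [h1, h2, h3, h4, h5]

lemma pvExpand_cons (u v h : Int) (r : List Int) :
    pvExpand u v (h :: r) = (pvExpand u v r).map
      (fun cand => (cand.1, cand.2.1, cand.2.2.1, cand.2.2.2.1, h :: cand.2.2.2.2)) := by
  unfold pvExpand
  rw [List.map_map]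
  rfl

lemma pvPicks_eq (t : List Int) :
    pvPicks t = (List.range t.length).map (fun k => (t.getD k 0, t.take k ++ t.drop (k + 1))) := by
  induction t with
  | nil => rfl
  | cons b s ih =>
    simp only [pvPicks, ih, List.length_cons, List.range_succ_eq_map, List.map_cons, List.map_map]
    congr 1

-- A's index-pair enumeration coincides with B's structural pair enumeration
lemma pvCands_eqA (c : List Int) :
    (PySem.List.pyRange 0 (c.length : Int) 1).flatMap (fun i =>
      (PySem.List.pyRange (i + 1) (c.length : Int) 1).flatMap (fun j =>
        pvExpand (PySem.List.pyGetD c i 0) (PySem.List.pyGetD c j 0) (pvReste c i j)))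
    = (pvPairs c).flatMap (fun q => pvExpand q.1 q.2.1 q.2.2) := by
  induction c with
  | nil => simp [pvPairs]
  | cons h t ih =>
    have hlen : ((h :: t).length : Int) = (t.length : Int) + 1 := by
      simp [List.length_cons]
    rw [hlen, PySem.List.pyRange_one_cons (by omega : (0:Int) < (t.length : Int) + 1),
        List.flatMap_cons]
    rw [show pvPairs (h :: t) = (pvPicks t).map (fun p => (h, p.1, p.2)) ++
        (pvPairs t).map (fun q => (q.1, q.2.1, h :: q.2.2)) from rfl, List.flatMap_append]
    congr 1
    · -- block for i = 0
      rw [pvRange_shift 0 (t.length : Int), List.flatMap_map]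
      rw [List.flatMap_congr (g := fun j' =>
          pvExpand h (PySem.List.pyGetD t j' 0) (t.take j'.toNat ++ t.drop (j'.toNat + 1)))
        (by
          intro j' hj'
          rw [PySem.List.mem_pyRange_one] at hj'
          rw [pvGetD_zero, pvGetD_cons _ _ hj'.1, pvReste_zero _ _ hj'.1])]
      rw [PySem.List.pyRange_zero, List.flatMap_map, List.flatMap_map, pvPicks_eq,
        List.flatMap_map]
      apply List.flatMap_congr
      intro k _
      simp [PySem.List.pyGetD_natCast]
    · -- block for i ≥ 1
      rw [pvRange_shift 0 (t.length : Int), List.flatMap_map]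
      rw [List.flatMap_congr (g := fun i' =>
          ((PySem.List.pyRange (i' + 1) (t.length : Int) 1).flatMap (fun j' =>
            pvExpand (PySem.List.pyGetD t i' 0) (PySem.List.pyGetD t j' 0) (pvReste t i' j'))).map
            (fun cand => (cand.1, cand.2.1, cand.2.2.1, cand.2.2.2.1, h :: cand.2.2.2.2)))
        (by
          intro i' hi'
          rw [PySem.List.mem_pyRange_one] at hi'
          dsimp only
          rw [pvRange_shift (i' + 1) (t.length : Int), List.flatMap_map, List.map_flatMap]
          apply List.flatMap_congr
          intro j' hj'
          rw [PySem.List.mem_pyRange_one] at hj'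
          rw [pvGetD_cons _ _ hi'.1, pvGetD_cons _ _ (by omega : (0:Int) ≤ j'),
            pvReste_cons _ _ hi'.1 (by omega : (0:Int) ≤ j'), pvExpand_cons])]
      rw [← List.map_flatMap, ih, List.flatMap_map, List.map_flatMap]
      apply List.flatMap_congr
      intro q _
      obtain ⟨u, v, r⟩ := q
      exact (pvExpand_cons u v h r).symm

-- B's candidate list, rewritten through pvExpand
lemma pvCands_eqB (c : List Int) :
    pvCands c = (pvPairs c).flatMap (fun q => pvExpand q.1 q.2.1 q.2.2) := by
  unfold pvCands
  apply List.flatMap_congr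
  intro q _
  obtain ⟨u, v, r⟩ := q
  have hx : (if u ≥ v then u else v) = max u v := by split_ifs <;> omega
  have hy : (if u ≥ v then v else u) = min u v := by split_ifs <;> omega
  simp only [hx, hy]
  rfl

-- A's whole pair search, as first-success over B's candidate list
lemma pvLoopIA_cands (rec : List Int → Option String) (c : List Int) :
    pvLoopIA rec c (PySem.List.pyRange 0 (c.length : Int) 1) = pvFirstA rec (pvCands c) := by
  rw [pvLoopIA_eq, pvCands_eqA, pvCands_eqB]

-- candidate children each hold one card fewer
lemma pvPicks_len (t : List Int) : ∀ p ∈ pvPicks t, p.2.length + 1 = t.length := by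
  induction t with
  | nil => intro p hp; simp [pvPicks] at hp
  | cons h t ih =>
    intro p hp
    simp only [pvPicks, List.mem_cons, List.mem_map] at hp
    rcases hp with rfl | ⟨p', hp', rfl⟩
    · rfl
    · have := ih p' hp'
      simp only [List.length_cons]
      omega

lemma pvPairs_len (c : List Int) : ∀ q ∈ pvPairs c, q.2.2.length + 2 = c.length := by
  induction c with
  | nil => intro q hq; simp [pvPairs] at hq
  | cons h t ih =>
    intro q hq
    simp only [pvPairs, List.mem_append, List.mem_map] at hq
    rcases hq with ⟨p, hp, rfl⟩ | ⟨q', hq', rfl⟩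
    · have := pvPicks_len t p hp
      simp only [List.length_cons]
      omega
    · have := ih q' hq'
      simp only [List.length_cons]
      omega

lemma pvCands_child_len (c : List Int) :
    ∀ cand ∈ pvCands c, cand.2.2.2.2.length + 1 = c.length := by
  intro cand hc
  rw [pvCands_eqB, List.mem_flatMap] at hc
  obtain ⟨q, hq, hcand⟩ := hc
  have hlen := pvPairs_len c q hq
  unfold pvExpand at hcand
  rw [List.mem_map] at hcand
  obtain ⟨p, _, rfl⟩ := hcand
  simp only [List.length_append, List.length_cons, List.length_nil]
  omega

-- the memo-set invariant: every cached card list fails in A's search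
def pvCacheOK (t : Int) (f : PySem.Set (List Int)) : Prop :=
  ∀ k ∈ f, pvRunA k.length k t = none

lemma pvCacheOK_add {t : Int} {f : PySem.Set (List Int)} (hf : pvCacheOK t f)
    {c : List Int} (hc : pvRunA c.length c t = none) :
    pvCacheOK t (PySem.Set.add f c) := by
  intro k hk
  rcases (PySem.Set.mem_add f c k).mp hk with h | h
  · exact hf k h
  · subst h; exact hc

-- the candidate loop agrees with A's first-success and preserves the invariant
lemma pvTryB_agree (m : Nat) (recA : List Int → Option String)
    (recB : List Int → PySem.Set (List Int) → Option String × PySem.Set (List Int)) (t : Int)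
    (h : ∀ c' f', c'.length = m → pvCacheOK t f' →
      (recB c' f').1 = recA c' ∧ pvCacheOK t (recB c' f').2) :
    ∀ L f, (∀ cand ∈ L, cand.2.2.2.2.length = m) → pvCacheOK t f →
      (pvTryB recB L f).1 = pvFirstA recA L ∧ pvCacheOK t (pvTryB recB L f).2 := by
  intro L
  induction L with
  | nil => intro f _ hf; exact ⟨rfl, hf⟩
  | cons cand rest ih =>
    obtain ⟨x, op, y, v, ch⟩ := cand
    intro f hL hf
    obtain ⟨h1, h2⟩ := h ch f (hL (x, op, y, v, ch) (by simp)) hf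
    rcases hB : recB ch f with ⟨r, f'⟩
    rw [hB] at h1 h2
    simp only at h1
    cases r with
    | some essai =>
      constructor
      · simp only [pvTryB, pvFirstA, hB, ← h1, pvLigne]
      · simpa [pvTryB, hB] using h2
    | none =>
      have hrest := ih f' (fun cand' hc' => hL cand' (by simp [hc'])) h2
      constructor
      · simp only [pvTryB, pvFirstA, hB, ← h1]
        exact hrest.1
      · simpa [pvTryB, hB] using hrest.2

lemma pvSolve_agree (t : Int) :
    ∀ fuel c f, c.length = fuel → pvCacheOK t f →
      (pvSolveB fuel t c f).1 = pvRunA fuel c t ∧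
      pvCacheOK t (pvSolveB fuel t c f).2 := by
  intro fuel
  induction fuel with
  | zero =>
    intro c f hc hf
    have hcnil : c = [] := List.length_eq_zero_iff.mp hc
    subst hcnil
    by_cases hcf : ([] : List Int) ∈ f
    · have hS : pvSolveB 0 t [] f = (none, f) := by simp [pvSolveB, hcf]
      rw [hS]
      exact ⟨by simp [pvRunA], hf⟩
    · have hS : pvSolveB 0 t [] f = (none, PySem.Set.add f []) := by simp [pvSolveB, hcf]
      rw [hS]
      exact ⟨by simp [pvRunA], pvCacheOK_add hf (by simp [pvRunA])⟩
  | succ fuel' ih =>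
    intro c f hc hf
    by_cases hct : t ∈ c
    · have hS : pvSolveB (fuel' + 1) t c f = (some "Le compte est bon !", f) := by
        simp [pvSolveB, hct]
      have hA : pvRunA (fuel' + 1) c t = some "Le compte est bon !" := by
        simp [pvRunA, hct]
      rw [hS, hA]
      exact ⟨rfl, hf⟩
    · have hA : pvRunA (fuel' + 1) c t =
          pvFirstA (fun c' => pvRunA fuel' c' t) (pvCands c) := by
        have hstep : pvRunA (fuel' + 1) c t =
            pvLoopIA (fun c' => pvRunA fuel' c' t) c
              (PySem.List.pyRange 0 (c.length : Int) 1) := by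
          simp [pvRunA, hct]
        rw [hstep, pvLoopIA_cands]
      by_cases hcf : c ∈ f
      · have hnone : pvRunA c.length c t = none := hf c hcf
        rw [hc] at hnone
        have hS : pvSolveB (fuel' + 1) t c f = (none, f) := by simp [pvSolveB, hct, hcf]
        rw [hS, hnone]
        exact ⟨rfl, hf⟩
      · have htry := pvTryB_agree fuel' (fun c' => pvRunA fuel' c' t)
          (fun c' f' => pvSolveB fuel' t c' f') t
          (fun c' f' hl hok => ih c' f' hl hok) (pvCands c) f
          (fun cand hcand => by have := pvCands_child_len c cand hcand; omega) hf
        rcases hB : pvTryB (fun c' f' => pvSolveB fuel' t c' f') (pvCands c) f with ⟨r, f'⟩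
        rw [hB] at htry
        obtain ⟨h1, h2⟩ := htry
        simp only at h1 h2
        cases r with
        | some rr =>
          have hS : pvSolveB (fuel' + 1) t c f = (some rr, f') := by
            simp [pvSolveB, hct, hcf, hB]
          rw [hS, hA, ← h1]
          exact ⟨rfl, h2⟩
        | none =>
          have hS : pvSolveB (fuel' + 1) t c f = (none, PySem.Set.add f' c) := by
            simp [pvSolveB, hct, hcf, hB]
          have hAnone : pvRunA (fuel' + 1) c t = none := by rw [hA, ← h1]
          rw [hS, hAnone]
          refine ⟨rfl, pvCacheOK_add h2 ?_⟩
          rw [hc]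
          exact hAnone

-- ===== VERDICT (by name: the statement is the Claim_ definition above) =====
theorem calculs_possibles_spec : Claim_equal_calculs_possibles := by
  intro c t _
  unfold Spec_calculs_possibles calculs_possibles calculs_possibles_alt
  have h := pvSolve_agree t c.length c PySem.Set.empty rfl
    (by intro k hk; simp [PySem.Set.empty] at hk)
  exact h.1.symm
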